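-- pv_equiv track=rewrite | github.com/Kaemon/AWS-Hackathon | app.py | analyze_crisis_severity
-- ===== SOURCE A (Python) =====
-- def analyze_crisis_severity(user_input):
--     """Analyze the severity level of crisis content"""
--     user_input_lower = user_input.lower().strip()
--
--     # Immediate danger indicators
--     immediate_danger = [
--         'tonight', 'today', 'right now', 'planning to', 'going to',
--         'have pills', 'have rope', 'have gun', 'made plan',
--         'decided to', 'ready to', 'about to'
--     ]
--
--     # High risk indicators
--     high_risk = [
--         'no reason to continue living', 'nothing left to live for',
--         'world better without me', 'nobody would miss me',
--         'tired of living', 'done with life', 'give up on life'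
--     ]
--
--     # Moderate risk indicators
--     moderate_risk = [
--         'meaningless', 'no meaning', 'failure at everything',
--         'nobody cares', 'all alone', 'nothing left'
--     ]
--
--     severity = "LOW"
--
--     for phrase in immediate_danger:
--         if phrase in user_input_lower:
--             return "IMMEDIATE"
--
--     for phrase in high_risk:
--         if phrase in user_input_lower:
--             severity = "HIGH"
--
--     for phrase in moderate_risk:
--         if phrase in user_input_lower:
--             if severity != "HIGH":
--                 severity = "MODERATE"
--
--     return severity
-- ===== SOURCE B (Python) =====
-- def analyze_crisis_severity(user_input):
--     text = user_input.lower().strip()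
--     # one ordered table: phrase -> rank (IMMEDIATE=3, HIGH=2, MODERATE=1)
--     table = [
--         ('tonight', 3), ('today', 3), ('right now', 3), ('planning to', 3),
--         ('going to', 3), ('have pills', 3), ('have rope', 3), ('have gun', 3),
--         ('made plan', 3), ('decided to', 3), ('ready to', 3), ('about to', 3),
--         ('no reason to continue living', 2), ('nothing left to live for', 2),
--         ('world better without me', 2), ('nobody would miss me', 2),
--         ('tired of living', 2), ('done with life', 2), ('give up on life', 2),
--         ('meaningless', 1), ('no meaning', 1), ('failure at everything', 1),
--         ('nobody cares', 1), ('all alone', 1), ('nothing left', 1),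
--     ]
--     best = 0
--     for phrase, rank in table:
--         if rank > best and phrase in text:
--             best = rank
--     return {3: 'IMMEDIATE', 2: 'HIGH', 1: 'MODERATE'}.get(best, 'LOW')
-- ===== Notes on version B (the rewrite author's own statement) =====
-- stated objective: simpler
-- what changed: replaced the three separate keyword scans with an early return and a guarded accumulator by one table-driven pass keeping the maximum rank whose phrase occurs, then mapping the rank back to its label
import Mathlib
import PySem

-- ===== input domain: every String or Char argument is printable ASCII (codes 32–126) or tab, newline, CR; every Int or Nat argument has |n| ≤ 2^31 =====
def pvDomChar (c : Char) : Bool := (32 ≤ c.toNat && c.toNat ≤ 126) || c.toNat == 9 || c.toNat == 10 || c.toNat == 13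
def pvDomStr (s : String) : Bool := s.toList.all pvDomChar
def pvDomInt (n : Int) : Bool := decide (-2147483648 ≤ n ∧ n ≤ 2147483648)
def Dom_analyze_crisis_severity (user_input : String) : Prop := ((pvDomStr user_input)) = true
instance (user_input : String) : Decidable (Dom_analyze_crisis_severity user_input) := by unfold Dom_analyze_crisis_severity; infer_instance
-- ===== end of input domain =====

-- B replaces A's three scans (early return + guarded accumulator) by one table-driven
-- max-rank pass over (phrase, rank) pairs; same cost, simpler decomposition.

-- ===== PORT A =====
def aImmediate : List String :=
  ["tonight", "today", "right now", "planning to", "going to",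
   "have pills", "have rope", "have gun", "made plan",
   "decided to", "ready to", "about to"]

def aHigh : List String :=
  ["no reason to continue living", "nothing left to live for",
   "world better without me", "nobody would miss me",
   "tired of living", "done with life", "give up on life"]

def aModerate : List String :=
  ["meaningless", "no meaning", "failure at everything",
   "nobody cares", "all alone", "nothing left"]

-- first loop: early return "IMMEDIATE" on a match
def aLoop1 : List String → String → Option String
  | [], _ => none
  | p :: ps, t => if PySem.Str.isIn p t then some "IMMEDIATE" else aLoop1 ps t

-- second loop: severity := "HIGH" on a match
def aLoop2 : List String → String → String → String
  | [], _, sev => sev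
  | p :: ps, t, sev => aLoop2 ps t (if PySem.Str.isIn p t then "HIGH" else sev)

-- third loop: severity := "MODERATE" on a match, unless already "HIGH"
def aLoop3 : List String → String → String → String
  | [], _, sev => sev
  | p :: ps, t, sev =>
      aLoop3 ps t (if PySem.Str.isIn p t then (if sev ≠ "HIGH" then "MODERATE" else sev) else sev)

def analyze_crisis_severity (user_input : String) : String :=
  let t := PySem.Str.strip (PySem.Str.lower user_input)
  match aLoop1 aImmediate t with
  | some r => r
  | none => aLoop3 aModerate t (aLoop2 aHigh t "LOW")

-- ===== PORT B =====
def bTable : List (String × Int) :=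
  [("tonight", 3), ("today", 3), ("right now", 3), ("planning to", 3),
   ("going to", 3), ("have pills", 3), ("have rope", 3), ("have gun", 3),
   ("made plan", 3), ("decided to", 3), ("ready to", 3), ("about to", 3),
   ("no reason to continue living", 2), ("nothing left to live for", 2),
   ("world better without me", 2), ("nobody would miss me", 2),
   ("tired of living", 2), ("done with life", 2), ("give up on life", 2),
   ("meaningless", 1), ("no meaning", 1), ("failure at everything", 1),
   ("nobody cares", 1), ("all alone", 1), ("nothing left", 1)]

def bLabels : PySem.Dict Int String :=
  PySem.Dict.ofList [(3, "IMMEDIATE"), (2, "HIGH"), (1, "MODERATE")]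

def analyze_crisis_severity_alt (user_input : String) : String :=
  let t := PySem.Str.strip (PySem.Str.lower user_input)
  let best := bTable.foldl
    (fun best pr => if decide (pr.2 > best) && PySem.Str.isIn pr.1 t then pr.2 else best) 0
  PySem.Dict.getD bLabels best "LOW"

-- ===== PRECONDITION & SPEC =====
def Spec_analyze_crisis_severity (user_input : String) (out : String) : Prop := out = analyze_crisis_severity_alt user_input
instance (user_input : String) (out : String) : Decidable (Spec_analyze_crisis_severity user_input out) := by unfold Spec_analyze_crisis_severity; infer_instance

-- ===== CLAIM (what is proved, stated in full; the proofs are below) =====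
def Claim_equal_analyze_crisis_severity : Prop := ∀ (user_input : String), Dom_analyze_crisis_severity user_input → Spec_analyze_crisis_severity user_input (analyze_crisis_severity user_input)

-- ===== LEMMAS AND PROOFS =====

-- "some phrase in ps occurs in t" (proof-side abbreviation)
def anyIn (ps : List String) (t : String) : Bool := ps.any (fun p => PySem.Str.isIn p t)

theorem anyIn_cons (p : String) (ps : List String) (t : String) :
    anyIn (p :: ps) t = (PySem.Str.isIn p t || anyIn ps t) := rfl

theorem aLoop1_eq (ps : List String) (t : String) :
    aLoop1 ps t = if anyIn ps t = true then some "IMMEDIATE" else none := by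
  induction ps with
  | nil => rfl
  | cons p ps ih =>
    rw [anyIn_cons]
    simp only [aLoop1]
    cases h : PySem.Str.isIn p t
    · simp [ih]
    · simp

theorem aLoop2_eq (ps : List String) (t : String) (sev : String) :
    aLoop2 ps t sev = if anyIn ps t = true then "HIGH" else sev := by
  induction ps generalizing sev with
  | nil => rfl
  | cons p ps ih =>
    rw [anyIn_cons]
    simp only [aLoop2]
    cases h : PySem.Str.isIn p t
    · simp [ih]
    · simp [ih]

theorem aLoop3_eq (ps : List String) (t : String) (sev : String) (hsev : sev ≠ "HIGH") :
    aLoop3 ps t sev = if anyIn ps t = true then "MODERATE" else sev := by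
  induction ps generalizing sev with
  | nil => rfl
  | cons p ps ih =>
    rw [anyIn_cons]
    simp only [aLoop3]
    cases h : PySem.Str.isIn p t
    · simp [ih sev hsev]
    · simp [hsev, ih "MODERATE" (by decide)]

theorem aLoop3_high (ps : List String) (t : String) : aLoop3 ps t "HIGH" = "HIGH" := by
  induction ps with
  | nil => rfl
  | cons p ps ih =>
    simp only [aLoop3]
    cases h : PySem.Str.isIn p t <;> simp [ih]

theorem bFold_const (ps : List String) (r : Int) (t : String) (b : Int) :
    (ps.map (fun p => (p, r))).foldl
      (fun best pr => if decide (pr.2 > best) && PySem.Str.isIn pr.1 t then pr.2 else best) b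
    = if decide (b < r) && anyIn ps t then r else b := by
  induction ps generalizing b with
  | nil => simp [anyIn]
  | cons p ps ih =>
    rw [anyIn_cons]
    simp only [List.map_cons, List.foldl_cons]
    cases h : PySem.Str.isIn p t
    · rw [if_neg (by simp), ih b, Bool.false_or]
    · rw [Bool.true_or, Bool.and_true]
      by_cases hb : b < r
      · rw [if_pos (by simp [hb]), ih r]
        simp [hb]
      · rw [if_neg (by simp [hb]), ih b]
        simp [hb]

theorem bTable_split :
    bTable = aImmediate.map (fun p => (p, (3 : Int)))
      ++ aHigh.map (fun p => (p, (2 : Int)))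
      ++ aModerate.map (fun p => (p, (1 : Int))) := rfl

-- ===== VERDICT (by name: the statement is the Claim_ definition above) =====
theorem analyze_crisis_severity_spec : Claim_equal_analyze_crisis_severity := by
  intro user_input _
  unfold Spec_analyze_crisis_severity analyze_crisis_severity analyze_crisis_severity_alt
  rw [bTable_split]
  simp only [List.foldl_append]
  rw [bFold_const, bFold_const, bFold_const, aLoop1_eq, aLoop2_eq]
  set t := PySem.Str.strip (PySem.Str.lower user_input) with ht
  cases hi : anyIn aImmediate t <;> cases hh : anyIn aHigh t <;> cases hm : anyIn aModerate t <;>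
    simp only [Bool.and_true, Bool.and_false, reduceIte,
      Int.reduceLT, decide_true, decide_false] <;>
    first
      | decide
      | (rw [aLoop3_high]; decide)
      | (rw [aLoop3_eq _ _ _ (by decide), hm]; decide)
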